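-- pv_equiv track=rewrite | github.com/JulioMartin12/desafioProgramacionISPC | Ejercicio10.py | diagonalSecundaria
-- ===== SOURCE A (Python) =====
-- def diagonalSecundaria(tablero, filaAlfil, columnaAlfil):
--       flag=False;
--       for fila in range(len(tablero)):
--            if flag:
--               break;
--            for columna in range(len(tablero[fila])):
--                  if (int(filaAlfil + columnaAlfil)) == ((fila+1) + (columna+1)) and tablero[fila][columna]=='T':
--                        flag=True;
--                        break;
--       return flag;
-- ===== SOURCE B (Python) =====
-- def diagonalSecundaria(tablero, filaAlfil, columnaAlfil):
--     s = filaAlfil + columnaAlfil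
--     for fila, row in enumerate(tablero):
--         c = s - fila - 2
--         if 0 <= c < len(row) and row[c] == 'T':
--             return True
--     return False
-- ===== Notes on version B (the rewrite author's own statement) =====
-- stated objective: faster
-- what changed: Instead of scanning every cell of every row, B computes for each row the single column index columna = filaAlfil+columnaAlfil-fila-2 that can lie on the anti-diagonal and checks only that cell.
import Mathlib
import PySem

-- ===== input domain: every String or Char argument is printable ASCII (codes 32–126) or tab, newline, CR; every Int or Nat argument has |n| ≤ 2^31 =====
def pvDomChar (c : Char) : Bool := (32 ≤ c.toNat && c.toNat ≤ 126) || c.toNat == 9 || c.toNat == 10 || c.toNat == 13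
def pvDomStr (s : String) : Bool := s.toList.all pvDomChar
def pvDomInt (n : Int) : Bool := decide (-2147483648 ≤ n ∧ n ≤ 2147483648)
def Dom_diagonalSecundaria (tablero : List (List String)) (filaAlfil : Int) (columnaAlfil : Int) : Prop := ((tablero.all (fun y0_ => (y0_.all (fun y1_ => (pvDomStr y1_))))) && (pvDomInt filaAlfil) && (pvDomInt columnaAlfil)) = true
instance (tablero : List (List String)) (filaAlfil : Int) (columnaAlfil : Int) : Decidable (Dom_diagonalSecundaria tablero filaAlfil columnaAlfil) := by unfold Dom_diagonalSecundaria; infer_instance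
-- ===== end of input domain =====

-- B checks, per row, only the single column that can lie on the anti-diagonal (O(rows) vs A's full scan).

-- ===== PORT A =====
-- inner 'for columna in range(len(tablero[fila]))' loop with its break
def aInnerLoop (s : Int) (fila : Nat) : List String → Nat → Bool
  | [], _ => false
  | cell :: rest, columna =>
    if s = ((fila : Int) + 1) + ((columna : Int) + 1) ∧ cell = "T" then true
    else aInnerLoop s fila rest (columna + 1)

-- outer 'for fila in range(len(tablero))' loop with the flag/break
def aOuterLoop (s : Int) : List (List String) → Nat → Bool → Bool
  | [], _, flag => flag
  | row :: rest, fila, flag =>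
    if flag then flag
    else aOuterLoop s rest (fila + 1) (aInnerLoop s fila row 0)

def diagonalSecundaria (tablero : List (List String)) (filaAlfil : Int) (columnaAlfil : Int) : Bool :=
  aOuterLoop (filaAlfil + columnaAlfil) tablero 0 false

-- ===== PORT B =====
-- '0 <= c < len(row) and row[c] == "T"'
def rowHitT (row : List String) (c : Int) : Bool :=
  decide (0 ≤ c) && decide (c < (row.length : Int)) && (row[c.toNat]? == some "T")

-- 'for fila, row in enumerate(tablero): …' with early return
def bLoop (s : Int) : List (List String) → Nat → Bool
  | [], _ => false
  | row :: rest, fila =>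
    if rowHitT row (s - (fila : Int) - 2) then true
    else bLoop s rest (fila + 1)

def diagonalSecundaria_alt (tablero : List (List String)) (filaAlfil : Int) (columnaAlfil : Int) : Bool :=
  bLoop (filaAlfil + columnaAlfil) tablero 0

-- ===== PRECONDITION & SPEC =====
def Spec_diagonalSecundaria (tablero : List (List String)) (filaAlfil : Int) (columnaAlfil : Int) (out : Bool) : Prop := out = diagonalSecundaria_alt tablero filaAlfil columnaAlfil
instance (tablero : List (List String)) (filaAlfil : Int) (columnaAlfil : Int) (out : Bool) : Decidable (Spec_diagonalSecundaria tablero filaAlfil columnaAlfil out) := by unfold Spec_diagonalSecundaria; infer_instance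

-- ===== CLAIM (what is proved, stated in full; the proofs are below) =====
def Claim_equal_diagonalSecundaria : Prop := ∀ (tablero : List (List String)) (filaAlfil : Int) (columnaAlfil : Int), Dom_diagonalSecundaria tablero filaAlfil columnaAlfil → Spec_diagonalSecundaria tablero filaAlfil columnaAlfil (diagonalSecundaria tablero filaAlfil columnaAlfil)

-- ===== LEMMAS AND PROOFS =====

-- what B's single-cell check says, as a proposition
theorem rowHitT_iff (row : List String) (c : Int) :
    rowHitT row c = true ↔ 0 ≤ c ∧ c.toNat < row.length ∧ row[c.toNat]? = some "T" := by
  simp only [rowHitT, Bool.and_eq_true, decide_eq_true_eq, beq_iff_eq]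
  constructor
  · rintro ⟨⟨h0, h1⟩, h2⟩
    exact ⟨h0, by omega, h2⟩
  · rintro ⟨h0, h1, h2⟩
    exact ⟨⟨h0, by omega⟩, h2⟩

-- what A's inner scan (started at column `columna`) finds, as a proposition
theorem aInner_iff (row : List String) (columna : Nat) (s : Int) (fila : Nat) :
    aInnerLoop s fila row columna = true ↔
      ∃ j, j < row.length ∧ s = (fila : Int) + (columna : Int) + (j : Int) + 2 ∧ row[j]? = some "T" := by
  induction row generalizing columna with
  | nil => simp [aInnerLoop]
  | cons cell rest ih =>
    rw [aInnerLoop]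
    by_cases h : s = ((fila : Int) + 1) + ((columna : Int) + 1) ∧ cell = "T"
    · simp only [if_pos h, true_iff]
      exact ⟨0, by simp, by push_cast; omega, by simp [h.2]⟩
    · rw [if_neg h, ih (columna + 1)]
      constructor
      · rintro ⟨j, hj, hs, hT⟩
        exact ⟨j + 1, by simpa using hj, by push_cast at hs ⊢; omega, by simpa using hT⟩
      · rintro ⟨j, hj, hs, hT⟩
        cases j with
        | zero =>
          exfalso
          apply h
          refine ⟨by push_cast at hs ⊢; omega, ?_⟩
          simpa using hT
        | succ j =>
          exact ⟨j, by simpa using hj, by push_cast at hs ⊢; omega, by simpa using hT⟩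

-- A's inner scan from column `columna` hits exactly the one cell B looks at.
theorem inner_eq (row : List String) (columna : Nat) (s : Int) (fila : Nat) :
    aInnerLoop s fila row columna = rowHitT row (s - (fila : Int) - (columna : Int) - 2) := by
  rw [Bool.eq_iff_iff, aInner_iff, rowHitT_iff]
  constructor
  · rintro ⟨j, hj, hs, hT⟩
    have hc : (s - (fila : Int) - (columna : Int) - 2).toNat = j := by omega
    exact ⟨by omega, by omega, by rw [hc]; exact hT⟩
  · rintro ⟨h0, hlt, hT⟩
    exact ⟨(s - (fila : Int) - (columna : Int) - 2).toNat, hlt, by omega, hT⟩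

theorem outer_true (s : Int) (t : List (List String)) (fila : Nat) :
    aOuterLoop s t fila true = true := by
  cases t <;> simp [aOuterLoop]

theorem outer_eq (s : Int) (t : List (List String)) (fila : Nat) :
    aOuterLoop s t fila false = bLoop s t fila := by
  induction t generalizing fila with
  | nil => rfl
  | cons row rest ih =>
    rw [aOuterLoop, if_neg (by simp), bLoop]
    have h0 : aInnerLoop s fila row 0 = rowHitT row (s - (fila : Int) - 2) := by
      simpa using inner_eq row 0 s fila
    by_cases h : rowHitT row (s - (fila : Int) - 2) = true
    · rw [h0, h]
      simp [outer_true]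
    · rw [h0, Bool.not_eq_true _ |>.mp h]
      simp [ih]

-- ===== VERDICT (by name: the statement is the Claim_ definition above) =====
theorem diagonalSecundaria_spec : Claim_equal_diagonalSecundaria := by
  intro t f c _
  unfold Spec_diagonalSecundaria diagonalSecundaria diagonalSecundaria_alt
  exact outer_eq (f + c) t 0
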